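-- pv_equiv track=rewrite | github.com/patrickzbhe/wikisolver | backend/scraper.py | trim_link
-- ===== SOURCE A (Python) =====
-- def trim_link(link):
--     # trim off brackets and wiki part
--     valid = "abcdefghijklmnopqrstuvwxyzABCDEFGHIJKLMNOPQRSTUVWXYZ0123456789"
--     link = link[6:]
--     output = ''
--     deleting = False
--     for i in range(len(link)):
--         if link[i] == '(':
--             deleting = True
--         elif link[i] == ')':
--             deleting = False
--         if (not deleting) and link[i] != ')':
--             if link[i] in valid:
--                 output += link[i]
--             else:
--                 output += ' '
--
--     output = output.strip()
--     output = output.lower()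
--     return output
-- ===== SOURCE B (Python) =====
-- VALID = "abcdefghijklmnopqrstuvwxyzABCDEFGHIJKLMNOPQRSTUVWXYZ0123456789"
--
-- def trim_link(link):
--     # Jump between parentheses with str.find instead of scanning char-by-char
--     # with a deleting flag.
--     s = link[6:]
--     parts = []
--     while True:
--         i = s.find('(')
--         if i == -1:
--             parts.append(s)
--             break
--         parts.append(s[:i])
--         j = s.find(')', i + 1)
--         if j == -1:
--             break
--         s = s[j + 1:]
--     cleaned = ''.join(parts)
--     spaced = ''.join(c if c in VALID else ' ' for c in cleaned if c != ')')
--     return spaced.strip().lower()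
-- ===== Notes on version B (the rewrite author's own statement) =====
-- stated objective: alternative
-- what changed: Replaces A's per-character scan with a deleting flag by a str.find-driven loop that jumps from each '(' to its closing ')' and collects the kept segments, then cleans them in one comprehension.
import Mathlib
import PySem

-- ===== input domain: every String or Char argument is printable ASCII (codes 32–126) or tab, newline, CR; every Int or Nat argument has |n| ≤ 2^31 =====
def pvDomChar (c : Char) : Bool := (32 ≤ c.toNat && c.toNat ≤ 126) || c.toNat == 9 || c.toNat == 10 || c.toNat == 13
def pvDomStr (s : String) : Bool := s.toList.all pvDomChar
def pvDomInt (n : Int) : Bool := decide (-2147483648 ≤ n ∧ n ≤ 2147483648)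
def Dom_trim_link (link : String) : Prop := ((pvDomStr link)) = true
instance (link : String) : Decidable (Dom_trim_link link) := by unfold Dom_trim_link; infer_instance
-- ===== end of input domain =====

-- B replaces A's per-character deleting-flag scan by a str.find-based loop that jumps
-- between parentheses and collects the kept segments (objective: alternative; same cost).

-- ===== PORT A =====
-- the `valid` constant of A
def trimValid : List Char :=
  "abcdefghijklmnopqrstuvwxyzABCDEFGHIJKLMNOPQRSTUVWXYZ0123456789".toList

-- one iteration of A's for-loop, state (output, deleting); `link[i] in valid` is
-- Python substring membership of a 1-char string = PySem.Chars.isIn [c] trimValid (exact)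
def trimStep (st : List Char × Bool) (c : Char) : List Char × Bool :=
  let deleting := if c = '(' then true else if c = ')' then false else st.2
  if deleting = false ∧ c ≠ ')' then
    (st.1 ++ [if PySem.Chars.isIn [c] trimValid then c else ' '], deleting)
  else
    (st.1, deleting)

def trim_link (link : String) : String :=
  -- link = link[6:]
  let s := PySem.Str.slice link (some 6) none
  -- for i in range(len(link)): … reading link[i]
  let st := s.toList.foldl trimStep ([], false)
  -- output.strip() then .lower()
  PySem.Str.lower (PySem.Str.strip (String.ofList st.1))

-- ===== PORT B =====
-- B's while-loop: i = s.find('('); collect s[:i]; j = s.find(')', i+1); continue with s[j+1:]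
def trimCollect (s : List Char) : List (List Char) :=
  let i := PySem.Chars.find s ['(']
  if hi : i = -1 then [s]
  else
    let j := PySem.Chars.findFrom s [')'] (i + 1)
    if j = -1 then [s.take i.toNat]
    else s.take i.toNat :: trimCollect (s.drop (j.toNat + 1))
termination_by s.length
decreasing_by
  have hin : ['('] <:+: s := (PySem.Chars.find_ne_neg_one_iff s ['(']).mp hi
  have hne : s ≠ [] := by rintro rfl; simp at hin
  have : 0 < s.length := List.length_pos_iff.mpr hne
  simp only [List.length_drop]
  omega

def trim_link_alt (link : String) : String :=
  let s := PySem.Str.slice link (some 6) none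
  let parts := trimCollect s.toList
  let cleaned := PySem.Chars.join [] parts
  -- ''.join(c if c in VALID else ' ' for c in cleaned if c != ')')
  let spaced := (cleaned.filter (fun c => c ≠ ')')).map
      (fun c => if PySem.Chars.isIn [c] trimValid then c else ' ')
  PySem.Str.lower (PySem.Str.strip (String.ofList spaced))

-- ===== PRECONDITION & SPEC =====
def Spec_trim_link (link : String) (out : String) : Prop := out = trim_link_alt link
instance (link : String) (out : String) : Decidable (Spec_trim_link link out) := by unfold Spec_trim_link; infer_instance

-- ===== CLAIM (what is proved, stated in full; the proofs are below) =====
def Claim_equal_trim_link : Prop := ∀ (link : String), Dom_trim_link link → Spec_trim_link link (trim_link link)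

-- ===== LEMMAS AND PROOFS =====

-- the raw characters A's loop keeps (the valid/space substitution applied afterwards)
def trimKeep : List Char → Bool → List Char
  | [], _ => []
  | c :: cs, d =>
    if c = '(' then trimKeep cs true
    else if c = ')' then trimKeep cs false
    else if d then trimKeep cs d else c :: trimKeep cs d

theorem trim_fold_eq (s : List Char) (acc : List Char) (d : Bool) :
    (s.foldl trimStep (acc, d)).1
      = acc ++ (trimKeep s d).map (fun c => if PySem.Chars.isIn [c] trimValid then c else ' ') := by
  induction s generalizing acc d with
  | nil => simp [trimKeep]
  | cons c cs ih =>
    rw [List.foldl_cons]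
    by_cases h1 : c = '('
    · subst h1
      have hstep : trimStep (acc, d) '(' = (acc, true) := by simp [trimStep]
      rw [hstep, ih, trimKeep]
      simp
    · by_cases h2 : c = ')'
      · subst h2
        have hstep : trimStep (acc, d) ')' = (acc, false) := by simp [trimStep]
        rw [hstep, ih]
        simp [trimKeep, h1]
      · cases d with
        | true =>
          have hstep : trimStep (acc, true) c = (acc, true) := by simp [trimStep, h1, h2]
          rw [hstep, ih]
          simp [trimKeep, h1, h2]
        | false =>
          have hstep : trimStep (acc, false) c
              = (acc ++ [if PySem.Chars.isIn [c] trimValid then c else ' '], false) := by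
            simp [trimStep, h1, h2]
          rw [hstep, ih]
          simp [trimKeep, h1, h2]

theorem trimKeep_append_noParen (pre t : List Char) (h : '(' ∉ pre) :
    trimKeep (pre ++ t) false = pre.filter (fun c => c ≠ ')') ++ trimKeep t false := by
  induction pre with
  | nil => simp
  | cons c cs ih =>
    have hc : c ≠ '(' := fun hh => h (hh ▸ List.mem_cons_self)
    have hcs : '(' ∉ cs := fun hh => h (List.mem_cons_of_mem _ hh)
    by_cases h2 : c = ')'
    · subst h2; simp [trimKeep, ih hcs]
    · simp [trimKeep, hc, h2, ih hcs]

theorem trimKeep_append_del (mid t : List Char) (h : ')' ∉ mid) :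
    trimKeep (mid ++ t) true = trimKeep t true := by
  induction mid with
  | nil => simp
  | cons c cs ih =>
    have hc : c ≠ ')' := fun hh => h (hh ▸ List.mem_cons_self)
    have hcs : ')' ∉ cs := fun hh => h (List.mem_cons_of_mem _ hh)
    by_cases h1 : c = '('
    · subst h1; simp [trimKeep, ih hcs]
    · simp [trimKeep, h1, hc, ih hcs]

theorem singleton_infix_iff (c : Char) (l : List Char) : [c] <:+: l ↔ c ∈ l := by
  constructor
  · intro h; exact h.sublist.subset List.mem_cons_self
  · intro h
    obtain ⟨a, b, rfl⟩ := List.append_of_mem h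
    exact ⟨a, b, by simp⟩

theorem trimCollect_ne_nil (s : List Char) : trimCollect s ≠ [] := by
  rw [trimCollect]
  split
  · simp
  · dsimp only
    split <;> simp

theorem trim_main_aux : ∀ (N : Nat) (s : List Char), s.length ≤ N →
    trimKeep s false = (PySem.Chars.join [] (trimCollect s)).filter (fun c => c ≠ ')') := by
  intro N
  induction N with
  | zero =>
    intro s hs
    have hnil : s = [] := by cases s with | nil => rfl | cons a l => simp at hs
    subst hnil
    have hf : PySem.Chars.find ([] : List Char) ['('] = -1 :=
      (PySem.Chars.find_eq_neg_one_iff _ _).mpr (by simp)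
    rw [trimCollect, dif_pos hf, PySem.Chars.join_singleton]
    simp [trimKeep]
  | succ N ihN =>
    intro s hs
    by_cases hi : PySem.Chars.find s ['('] = -1
    · -- no '(' in s
      have hnin : '(' ∉ s := fun hmem =>
        ((PySem.Chars.find_ne_neg_one_iff s ['(']).mpr ((singleton_infix_iff _ _).mpr hmem)) hi
      have hcoll : trimCollect s = [s] := by rw [trimCollect]; simp [hi]
      rw [hcoll, PySem.Chars.join_singleton]
      calc trimKeep s false
          = trimKeep (s ++ []) false := by rw [List.append_nil]
        _ = s.filter (fun c => c ≠ ')') ++ trimKeep [] false :=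
            trimKeep_append_noParen s [] hnin
        _ = s.filter (fun c => c ≠ ')') := by simp [trimKeep]
    · have hinf : ['('] <:+: s := (PySem.Chars.find_ne_neg_one_iff s ['(']).mp hi
      have h0 : 0 ≤ PySem.Chars.find s ['('] := (PySem.Chars.find_nonneg_iff s ['(']).mpr hinf
      obtain ⟨hpref, hmin⟩ := PySem.Chars.find_spec (s := s) (sub := ['(']) h0
      set i := PySem.Chars.find s ['('] with hidef
      set n := i.toNat with hndef
      have hin : i = (n : Int) := by omega
      obtain ⟨t, ht⟩ := hpref
      have hnlt : n < s.length := by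
        by_contra hcon
        have hd : s.drop n = [] := List.drop_eq_nil_iff.mpr (by omega)
        rw [hd] at ht; simp at ht
      have htail : t = s.drop (n + 1) := by
        have h1 : t = List.drop 1 (List.drop n s) := by rw [← ht]; rfl
        rw [h1, List.drop_drop]
      have hdropn : s.drop n = '(' :: s.drop (n + 1) := by
        rw [← ht, htail]; rfl
      have hpre : '(' ∉ s.take n := by
        intro hmem
        obtain ⟨m, hmlt, hget⟩ := List.getElem_of_mem hmem
        have hmn : m < n := by simp at hmlt; omega
        have hms : m < s.length := by omega
        have hsm : s[m]'hms = '(' := by rw [← List.getElem_take (xs := s) (j := n)]; exact hget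
        exact hmin m hmn ⟨s.drop (m + 1), by rw [List.drop_eq_getElem_cons hms, hsm]; rfl⟩
      have hk : n + 1 ≤ s.length := hnlt
      have hfcast : i + 1 = ((n + 1 : Nat) : Int) := by omega
      by_cases hj : PySem.Chars.findFrom s [')'] (i + 1) = -1
      · -- no ')' after the '(' : everything from '(' on is deleted
        have hnocl : ')' ∉ s.drop (n + 1) := by
          have hnj := (PySem.Chars.findFrom_natCast_eq_neg_one_iff s [')'] (n + 1) hk).mp
            (by rw [← hfcast]; exact hj)
          exact fun hmem => hnj ((singleton_infix_iff _ _).mpr hmem)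
        have hcoll : trimCollect s = [s.take i.toNat] := by
          rw [trimCollect]
          rw [dif_neg hi, if_pos hj]
        rw [hcoll, ← hndef, PySem.Chars.join_singleton]
        calc trimKeep s false
            = trimKeep (s.take n ++ ('(' :: s.drop (n + 1))) false := by
              conv_lhs => rw [← List.take_append_drop n s, hdropn]
          _ = (s.take n).filter (fun c => c ≠ ')')
                ++ trimKeep ('(' :: s.drop (n + 1)) false := trimKeep_append_noParen _ _ hpre
          _ = (s.take n).filter (fun c => c ≠ ')')
                ++ trimKeep (s.drop (n + 1) ++ []) true := by simp [trimKeep]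
          _ = (s.take n).filter (fun c => c ≠ ')') := by
              rw [trimKeep_append_del _ _ hnocl]; simp [trimKeep]
      · -- a matching ')' at position m; recurse on s[m+1:]
        have hj' : PySem.Chars.findFrom s [')'] ((n + 1 : Nat) : Int) ≠ -1 := by
          rw [← hfcast]; exact hj
        obtain ⟨hkj, hprefj, hminj⟩ := PySem.Chars.findFrom_natCast_spec s [')'] (n + 1) hk hj'
        set j0 := PySem.Chars.findFrom s [')'] ((n + 1 : Nat) : Int) with hj0def
        set m := j0.toNat with hmdef
        have hkm : n + 1 ≤ m := by omega
        obtain ⟨t2, ht2⟩ := hprefj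
        have hmlt : m < s.length := by
          by_contra hcon
          have hd : s.drop m = [] := List.drop_eq_nil_iff.mpr (by omega)
          rw [hd] at ht2; simp at ht2
        have htail2 : t2 = s.drop (m + 1) := by
          have h1 : t2 = List.drop 1 (List.drop m s) := by rw [← ht2]; rfl
          rw [h1, List.drop_drop]
        have hdropm : s.drop m = ')' :: s.drop (m + 1) := by
          rw [← ht2, htail2]; rfl
        have hmid : ')' ∉ (s.drop (n + 1)).take (m - (n + 1)) := by
          intro hmem
          obtain ⟨q, hqlt, hqget⟩ := List.getElem_of_mem hmem
          have hq1 : q < m - (n + 1) := by simp at hqlt; omega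
          have hq2 : (n + 1) + q < s.length := by simp at hqlt; omega
          have hq3 : q < (s.drop (n + 1)).length := by
            simp only [List.length_drop]; omega
          have hsq : s[(n + 1) + q]'hq2 = ')' := by
            have e1 : (List.take (m - (n + 1)) (List.drop (n + 1) s))[q]'hqlt
                = (List.drop (n + 1) s)[q]'hq3 := List.getElem_take
            have e2 : (List.drop (n + 1) s)[q]'hq3 = s[(n + 1) + q]'hq2 := List.getElem_drop
            rw [← e2, ← e1]
            exact hqget
          refine hminj ((n + 1) + q) (by omega) (by omega) ?_
          exact ⟨s.drop ((n + 1) + q + 1), by rw [List.drop_eq_getElem_cons hq2, hsq]; rfl⟩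
        have hdecomp : s.drop (n + 1)
            = (s.drop (n + 1)).take (m - (n + 1)) ++ (')' :: s.drop (m + 1)) := by
          conv_lhs => rw [← List.take_append_drop (m - (n + 1)) (s.drop (n + 1))]
          rw [List.drop_drop]
          have heq : (n + 1) + (m - (n + 1)) = m := by omega
          rw [heq, hdropm]
        have hlen : (s.drop (m + 1)).length ≤ N := by
          simp only [List.length_drop]; omega
        have ihx := ihN (s.drop (m + 1)) hlen
        have hjtoNat : (PySem.Chars.findFrom s [')'] (i + 1)).toNat = m := by
          rw [hfcast, ← hj0def]
        have hcoll : trimCollect s = s.take n :: trimCollect (s.drop (m + 1)) := by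
          rw [trimCollect]
          rw [dif_neg hi, if_neg hj, hjtoNat, ← hndef]
        obtain ⟨b, r, hrest⟩ : ∃ b r, trimCollect (s.drop (m + 1)) = b :: r := by
          cases hx : trimCollect (s.drop (m + 1)) with
          | nil => exact absurd hx (trimCollect_ne_nil _)
          | cons b r => exact ⟨b, r, rfl⟩
        rw [hcoll, hrest, PySem.Chars.join_cons_cons, List.append_nil, List.filter_append]
        rw [hrest] at ihx
        calc trimKeep s false
            = trimKeep (s.take n ++ ('(' :: s.drop (n + 1))) false := by
              conv_lhs => rw [← List.take_append_drop n s, hdropn]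
          _ = (s.take n).filter (fun c => c ≠ ')')
                ++ trimKeep ('(' :: s.drop (n + 1)) false := trimKeep_append_noParen _ _ hpre
          _ = (s.take n).filter (fun c => c ≠ ')')
                ++ trimKeep (s.drop (n + 1)) true := by simp [trimKeep]
          _ = (s.take n).filter (fun c => c ≠ ')')
                ++ trimKeep ((s.drop (n + 1)).take (m - (n + 1))
                      ++ (')' :: s.drop (m + 1))) true := by rw [← hdecomp]
          _ = (s.take n).filter (fun c => c ≠ ')')
                ++ trimKeep (')' :: s.drop (m + 1)) true := by
              rw [trimKeep_append_del _ _ hmid]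
          _ = (s.take n).filter (fun c => c ≠ ')')
                ++ trimKeep (s.drop (m + 1)) false := by simp [trimKeep]
          _ = (s.take n).filter (fun c => c ≠ ')')
                ++ (PySem.Chars.join [] (b :: r)).filter (fun c => c ≠ ')') := by rw [ihx]

theorem trim_main (s : List Char) :
    trimKeep s false = (PySem.Chars.join [] (trimCollect s)).filter (fun c => c ≠ ')') :=
  trim_main_aux s.length s le_rfl

-- ===== VERDICT (by name: the statement is the Claim_ definition above) =====
theorem trim_link_spec : Claim_equal_trim_link := by
  intro link _
  show trim_link link = trim_link_alt link
  unfold trim_link trim_link_alt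
  dsimp only
  rw [trim_fold_eq, trim_main]
  simp
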